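-- pv_equiv track=rewrite | github.com/Mapet13/Studia | kolosy/2020_2021/03/zad5.py | trojki
-- ===== SOURCE A (Python) =====
-- def NWD(x, y):
--     while y != 0:
--         z = x % y
--         x = y
--         y = z
--     return x
--
-- def checkNWD(a, b, c):
--     return NWD(a, b) == NWD(a, c) == NWD(b, c) == 1
--
-- def trojki(T):
--     N = len(T) # dla wygody len zapisuje do zmiennej
--
--     counter = 0 # licznik wystapien trojek
--
--     for i in range(N-2):  # sprawdzam pierwsza liczbe z trojki
--         for o1 in range(1, 3): # kolejna liczba moze byc oddalona od pierwszej o 1 lub 2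
--             for o2 in range(1, 3):  # kolejna liczba moze byc oddalona od drugiej o 1 lub 2
--                 if i+o1+o2 < N: # sprawdzam czy nie wychodze poza dlugosc tablicy
--                     if checkNWD(T[i], T[i+o1], T[i+o1+o2]): #jesli te liczby stanowia trojke to zwieksze licznik
--                         counter += 1
--
--     return counter
-- ===== SOURCE B (Python) =====
-- def NWD(x, y):
--     while y != 0:
--         x, y = y, x % y
--     return x
--
-- def trojki(T):
--     N = len(T)
--     # precompute coprimality of pairs at each distance a triple can use
--     cop1 = [NWD(T[i], T[i + 1]) == 1 for i in range(N - 1)]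
--     cop2 = [NWD(T[i], T[i + 2]) == 1 for i in range(N - 2)]
--     cop3 = [NWD(T[i], T[i + 3]) == 1 for i in range(N - 3)]
--     cop4 = [NWD(T[i], T[i + 4]) == 1 for i in range(N - 4)]
--     counter = 0
--     for i in range(N - 2):
--         if cop1[i] and cop1[i + 1] and cop2[i]:
--             counter += 1
--     for i in range(N - 3):
--         if cop1[i] and cop2[i + 1] and cop3[i]:
--             counter += 1
--     for i in range(N - 3):
--         if cop2[i] and cop1[i + 2] and cop3[i]:
--             counter += 1
--     for i in range(N - 4):
--         if cop2[i] and cop2[i + 2] and cop4[i]: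
--             counter += 1
--     return counter
-- ===== Notes on version B (the rewrite author's own statement) =====
-- stated objective: faster
-- what changed: Instead of re-deriving each pairwise gcd inside a triple loop over offset combinations, B precomputes four boolean tables of coprimality at distances 1-4 in one pass each and then counts the four offset patterns by table lookup, so every gcd is computed exactly once.
import Mathlib
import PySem

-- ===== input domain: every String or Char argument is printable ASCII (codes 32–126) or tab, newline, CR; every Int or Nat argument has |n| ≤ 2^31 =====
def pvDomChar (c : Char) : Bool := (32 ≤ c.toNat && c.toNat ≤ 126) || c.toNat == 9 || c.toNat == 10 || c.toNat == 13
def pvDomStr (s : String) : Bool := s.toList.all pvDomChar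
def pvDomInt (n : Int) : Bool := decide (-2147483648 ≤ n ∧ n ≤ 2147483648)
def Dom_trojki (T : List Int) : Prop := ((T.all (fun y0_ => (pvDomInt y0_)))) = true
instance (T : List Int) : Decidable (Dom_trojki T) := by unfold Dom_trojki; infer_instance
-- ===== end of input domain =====

-- B precomputes each pairwise-gcd test once in distance tables instead of recomputing gcds per triple (constant-factor speedup).

-- termination helper for the Euclidean loop (cited by `nwd`'s decreasing_by)
theorem pvMod_natAbs_lt (x y : Int) (h : ¬ y = 0) : (PySem.Int.mod x y).natAbs < y.natAbs := by
  rcases lt_or_gt_of_ne h with hy | hy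
  · have := PySem.Int.mod_neg_bounds x hy; omega
  · have h1 := PySem.Int.mod_nonneg x hy
    have h2 := PySem.Int.mod_lt x hy
    omega

-- ===== PORT A =====
-- NWD: while y != 0: z = x % y; x = y; y = z; return x
def nwd (x y : Int) : Int :=
  if h : y = 0 then x else nwd y (PySem.Int.mod x y)
termination_by y.natAbs
decreasing_by exact pvMod_natAbs_lt x y h

-- checkNWD: NWD(a,b) == NWD(a,c) == NWD(b,c) == 1 (chained comparison)
def checkNWD (a b c : Int) : Bool :=
  decide (nwd a b = nwd a c) && decide (nwd a c = nwd b c) && decide (nwd b c = 1)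

def trojki (T : List Int) : Int :=
  let N : Int := PySem.List.len T
  let counter : Int := 0
  (PySem.List.pyRange 0 (N - 2)).foldl (fun counter i =>
    (PySem.List.pyRange 1 3).foldl (fun counter o1 =>
      (PySem.List.pyRange 1 3).foldl (fun counter o2 =>
        if i + o1 + o2 < N then
          if checkNWD (PySem.List.pyGetD T i 0) (PySem.List.pyGetD T (i + o1) 0)
              (PySem.List.pyGetD T (i + o1 + o2) 0) then
            counter + 1
          else counter
        else counter) counter) counter) counter

-- ===== PORT B =====
def trojki_alt (T : List Int) : Int :=
  let N : Int := PySem.List.len T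
  let cop1 := (PySem.List.pyRange 0 (N - 1)).map (fun i =>
    decide (nwd (PySem.List.pyGetD T i 0) (PySem.List.pyGetD T (i + 1) 0) = 1))
  let cop2 := (PySem.List.pyRange 0 (N - 2)).map (fun i =>
    decide (nwd (PySem.List.pyGetD T i 0) (PySem.List.pyGetD T (i + 2) 0) = 1))
  let cop3 := (PySem.List.pyRange 0 (N - 3)).map (fun i =>
    decide (nwd (PySem.List.pyGetD T i 0) (PySem.List.pyGetD T (i + 3) 0) = 1))
  let cop4 := (PySem.List.pyRange 0 (N - 4)).map (fun i =>
    decide (nwd (PySem.List.pyGetD T i 0) (PySem.List.pyGetD T (i + 4) 0) = 1))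
  let counter : Int := 0
  let counter := (PySem.List.pyRange 0 (N - 2)).foldl (fun counter i =>
    if PySem.List.pyGetD cop1 i false && PySem.List.pyGetD cop1 (i + 1) false &&
        PySem.List.pyGetD cop2 i false then counter + 1 else counter) counter
  let counter := (PySem.List.pyRange 0 (N - 3)).foldl (fun counter i =>
    if PySem.List.pyGetD cop1 i false && PySem.List.pyGetD cop2 (i + 1) false &&
        PySem.List.pyGetD cop3 i false then counter + 1 else counter) counter
  let counter := (PySem.List.pyRange 0 (N - 3)).foldl (fun counter i =>
    if PySem.List.pyGetD cop2 i false && PySem.List.pyGetD cop1 (i + 2) false &&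
        PySem.List.pyGetD cop3 i false then counter + 1 else counter) counter
  let counter := (PySem.List.pyRange 0 (N - 4)).foldl (fun counter i =>
    if PySem.List.pyGetD cop2 i false && PySem.List.pyGetD cop2 (i + 2) false &&
        PySem.List.pyGetD cop4 i false then counter + 1 else counter) counter
  counter

-- ===== PRECONDITION & SPEC =====
def Spec_trojki (T : List Int) (out : Int) : Prop := out = trojki_alt T
instance (T : List Int) (out : Int) : Decidable (Spec_trojki T out) := by unfold Spec_trojki; infer_instance

-- ===== CLAIM (what is proved, stated in full; the proofs are below) =====
def Claim_equal_trojki : Prop := ∀ (T : List Int), Dom_trojki T → Spec_trojki T (trojki T)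

-- ===== LEMMAS AND PROOFS =====

-- pairwise coprimality test at distance d, Nat-indexed
def pvQ (T : List Int) (d k : Nat) : Bool :=
  decide (nwd (T.getD k 0) (T.getD (k + d) 0) = 1)

def pvQ11 (T : List Int) (k : Nat) : Bool := pvQ T 1 k && pvQ T 1 (k + 1) && pvQ T 2 k
def pvQ12 (T : List Int) (k : Nat) : Bool := pvQ T 1 k && pvQ T 2 (k + 1) && pvQ T 3 k
def pvQ21 (T : List Int) (k : Nat) : Bool := pvQ T 2 k && pvQ T 1 (k + 2) && pvQ T 3 k
def pvQ22 (T : List Int) (k : Nat) : Bool := pvQ T 2 k && pvQ T 2 (k + 2) && pvQ T 4 k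

theorem checkNWD_eq (a b c : Int) :
    checkNWD a b c = (decide (nwd a b = 1) && decide (nwd b c = 1) && decide (nwd a c = 1)) := by
  unfold checkNWD
  by_cases h1 : nwd a b = 1 <;> by_cases h2 : nwd b c = 1 <;> by_cases h3 : nwd a c = 1 <;>
    simp [h1, h2, h3]

theorem pvPyRange_sub (n k : Nat) :
    PySem.List.pyRange 0 ((n : Int) - (k : Int)) = List.map (fun j : Nat => (j : Int)) (List.range (n - k)) := by
  rcases Nat.lt_or_ge n k with h | h
  · have h1 : ((n : Int) - (k : Int)) ≤ 0 := by omega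
    have h2 : n - k = 0 := by omega
    rw [h2, PySem.List.pyRange_one_eq_nil h1]
    simp
  · have : ((n : Int) - (k : Int)) = ((n - k : Nat) : Int) := by push_cast [h]; ring
    rw [this, PySem.List.pyRange_zero_natCast]

theorem pvCount_trunc (p : Nat → Bool) (m n : Nat) (h : m ≤ n) :
    List.countP (fun i => decide (i < m) && p i) (List.range n) = List.countP p (List.range m) := by
  obtain ⟨c, rfl⟩ := Nat.exists_eq_add_of_le h
  rw [List.range_add, List.countP_append]
  have h1 : List.countP (fun i => decide (i < m) && p i) (List.map (m + ·) (List.range c)) = 0 := by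
    rw [List.countP_map]
    simp [Function.comp]
  have h2 : List.countP (fun i => decide (i < m) && p i) (List.range m) = List.countP p (List.range m) := by
    apply List.countP_congr
    intro a ha
    simp [List.mem_range.mp ha]
  omega

theorem pvAddOne (c1 : Prop) [Decidable c1] (c2 : Bool) (acc : Int) :
    (if c1 then (if c2 then acc + 1 else acc) else acc)
      = acc + (if c1 then (if c2 then (1 : Int) else 0) else 0) := by
  split_ifs <;> ring

theorem pvA11 (T : List Int) (k : Nat) :
    (if (k : Int) + 1 + 1 < (T.length : Int) then
      (if checkNWD (PySem.List.pyGetD T (k : Int) 0) (PySem.List.pyGetD T ((k : Int) + 1) 0)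
          (PySem.List.pyGetD T ((k : Int) + 1 + 1) 0) then (1 : Int) else 0) else 0)
    = (if decide (k + 2 < T.length) && pvQ11 T k then 1 else 0) := by
  have e2 : ((k : Int) + 1 + 1) = ((k + 2 : Nat) : Int) := by push_cast; ring
  have e1 : ((k : Int) + 1) = ((k + 1 : Nat) : Int) := by push_cast; ring
  rw [e2, e1, PySem.List.pyGetD_natCast, PySem.List.pyGetD_natCast, PySem.List.pyGetD_natCast,
    checkNWD_eq]
  have e3 : k + 1 + 1 = k + 2 := by omega
  simp only [pvQ11, pvQ, e3, Nat.cast_lt]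
  by_cases hg : k + 2 < T.length
  · simp only [hg, decide_true, Bool.true_and, if_true]
  · simp only [hg, decide_false, Bool.false_and, Bool.false_eq_true, if_false]

theorem pvA12 (T : List Int) (k : Nat) :
    (if (k : Int) + 1 + 2 < (T.length : Int) then
      (if checkNWD (PySem.List.pyGetD T (k : Int) 0) (PySem.List.pyGetD T ((k : Int) + 1) 0)
          (PySem.List.pyGetD T ((k : Int) + 1 + 2) 0) then (1 : Int) else 0) else 0)
    = (if decide (k + 3 < T.length) && pvQ12 T k then 1 else 0) := by
  have e2 : ((k : Int) + 1 + 2) = ((k + 3 : Nat) : Int) := by push_cast; ring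
  have e1 : ((k : Int) + 1) = ((k + 1 : Nat) : Int) := by push_cast; ring
  rw [e2, e1, PySem.List.pyGetD_natCast, PySem.List.pyGetD_natCast, PySem.List.pyGetD_natCast,
    checkNWD_eq]
  have e3 : k + 1 + 2 = k + 3 := by omega
  simp only [pvQ12, pvQ, e3, Nat.cast_lt]
  by_cases hg : k + 3 < T.length
  · simp only [hg, decide_true, Bool.true_and, if_true]
  · simp only [hg, decide_false, Bool.false_and, Bool.false_eq_true, if_false]

theorem pvA21 (T : List Int) (k : Nat) :
    (if (k : Int) + 2 + 1 < (T.length : Int) then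
      (if checkNWD (PySem.List.pyGetD T (k : Int) 0) (PySem.List.pyGetD T ((k : Int) + 2) 0)
          (PySem.List.pyGetD T ((k : Int) + 2 + 1) 0) then (1 : Int) else 0) else 0)
    = (if decide (k + 3 < T.length) && pvQ21 T k then 1 else 0) := by
  have e2 : ((k : Int) + 2 + 1) = ((k + 3 : Nat) : Int) := by push_cast; ring
  have e1 : ((k : Int) + 2) = ((k + 2 : Nat) : Int) := by push_cast; ring
  rw [e2, e1, PySem.List.pyGetD_natCast, PySem.List.pyGetD_natCast, PySem.List.pyGetD_natCast,
    checkNWD_eq]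
  have e3 : k + 2 + 1 = k + 3 := by omega
  simp only [pvQ21, pvQ, e3, Nat.cast_lt]
  by_cases hg : k + 3 < T.length
  · simp only [hg, decide_true, Bool.true_and, if_true]
  · simp only [hg, decide_false, Bool.false_and, Bool.false_eq_true, if_false]

theorem pvA22 (T : List Int) (k : Nat) :
    (if (k : Int) + 2 + 2 < (T.length : Int) then
      (if checkNWD (PySem.List.pyGetD T (k : Int) 0) (PySem.List.pyGetD T ((k : Int) + 2) 0)
          (PySem.List.pyGetD T ((k : Int) + 2 + 2) 0) then (1 : Int) else 0) else 0)
    = (if decide (k + 4 < T.length) && pvQ22 T k then 1 else 0) := by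
  have e2 : ((k : Int) + 2 + 2) = ((k + 4 : Nat) : Int) := by push_cast; ring
  have e1 : ((k : Int) + 2) = ((k + 2 : Nat) : Int) := by push_cast; ring
  rw [e2, e1, PySem.List.pyGetD_natCast, PySem.List.pyGetD_natCast, PySem.List.pyGetD_natCast,
    checkNWD_eq]
  have e3 : k + 2 + 2 = k + 4 := by omega
  simp only [pvQ22, pvQ, e3, Nat.cast_lt]
  by_cases hg : k + 4 < T.length
  · simp only [hg, decide_true, Bool.true_and, if_true]
  · simp only [hg, decide_false, Bool.false_and, Bool.false_eq_true, if_false]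

def pvCnt (T : List Int) : Int :=
    ((List.countP (pvQ11 T) (List.range (T.length - 2)) : Nat) : Int)
  + ((List.countP (pvQ12 T) (List.range (T.length - 3)) : Nat) : Int)
  + ((List.countP (pvQ21 T) (List.range (T.length - 3)) : Nat) : Int)
  + ((List.countP (pvQ22 T) (List.range (T.length - 4)) : Nat) : Int)

theorem pvA_eq (T : List Int) : trojki T = pvCnt T := by
  simp only [trojki, PySem.List.len]
  rw [show PySem.List.pyRange 1 3 = [1, 2] from by decide]
  simp only [List.foldl_cons, List.foldl_nil]
  rw [PySem.List.foldl_congr_mem _ _ (fun (acc i : Int) => acc +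
      ((if i + 1 + 1 < (T.length : Int) then
          (if checkNWD (PySem.List.pyGetD T i 0) (PySem.List.pyGetD T (i + 1) 0)
              (PySem.List.pyGetD T (i + 1 + 1) 0) then (1 : Int) else 0) else 0)
      + (if i + 1 + 2 < (T.length : Int) then
          (if checkNWD (PySem.List.pyGetD T i 0) (PySem.List.pyGetD T (i + 1) 0)
              (PySem.List.pyGetD T (i + 1 + 2) 0) then (1 : Int) else 0) else 0)
      + (if i + 2 + 1 < (T.length : Int) then
          (if checkNWD (PySem.List.pyGetD T i 0) (PySem.List.pyGetD T (i + 2) 0)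
              (PySem.List.pyGetD T (i + 2 + 1) 0) then (1 : Int) else 0) else 0)
      + (if i + 2 + 2 < (T.length : Int) then
          (if checkNWD (PySem.List.pyGetD T i 0) (PySem.List.pyGetD T (i + 2) 0)
              (PySem.List.pyGetD T (i + 2 + 2) 0) then (1 : Int) else 0) else 0))) 0
    (by intro acc x _; simp only [pvAddOne]; ring_nf)]
  rw [PySem.List.foldl_add]
  rw [show ((T.length : Int) - 2) = ((T.length : Int) - ((2 : Nat) : Int)) from by norm_num,
    pvPyRange_sub, List.map_map]
  rw [List.map_congr_left (fun k _ => by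
    simp only [Function.comp_apply]
    rw [pvA11, pvA12, pvA21, pvA22])]
  rw [PySem.List.sum_map_add_int, PySem.List.sum_map_add_int, PySem.List.sum_map_add_int]
  rw [PySem.List.sum_map_ite_one_zero, PySem.List.sum_map_ite_one_zero,
    PySem.List.sum_map_ite_one_zero, PySem.List.sum_map_ite_one_zero]
  have c11 : List.countP (fun k => decide (k + 2 < T.length) && pvQ11 T k)
      (List.range (T.length - 2)) = List.countP (pvQ11 T) (List.range (T.length - 2)) := by
    apply List.countP_congr
    intro a ha
    have h := List.mem_range.mp ha
    simp [show a + 2 < T.length from by omega]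
  have c12 : List.countP (fun k => decide (k + 3 < T.length) && pvQ12 T k)
      (List.range (T.length - 2)) = List.countP (pvQ12 T) (List.range (T.length - 3)) := by
    have e : (fun k => decide (k + 3 < T.length) && pvQ12 T k)
        = (fun k => decide (k < T.length - 3) && pvQ12 T k) := by
      funext k; congr 1; exact decide_eq_decide.mpr (by omega)
    rw [e]; exact pvCount_trunc _ _ _ (by omega)
  have c21 : List.countP (fun k => decide (k + 3 < T.length) && pvQ21 T k)
      (List.range (T.length - 2)) = List.countP (pvQ21 T) (List.range (T.length - 3)) := by
    have e : (fun k => decide (k + 3 < T.length) && pvQ21 T k)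
        = (fun k => decide (k < T.length - 3) && pvQ21 T k) := by
      funext k; congr 1; exact decide_eq_decide.mpr (by omega)
    rw [e]; exact pvCount_trunc _ _ _ (by omega)
  have c22 : List.countP (fun k => decide (k + 4 < T.length) && pvQ22 T k)
      (List.range (T.length - 2)) = List.countP (pvQ22 T) (List.range (T.length - 4)) := by
    have e : (fun k => decide (k + 4 < T.length) && pvQ22 T k)
        = (fun k => decide (k < T.length - 4) && pvQ22 T k) := by
      funext k; congr 1; exact decide_eq_decide.mpr (by omega)
    rw [e]; exact pvCount_trunc _ _ _ (by omega)
  rw [c11, c12, c21, c22]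
  unfold pvCnt
  exact zero_add _

theorem pvCopLookup (T : List Int) (dz : Int) (d k : Nat) (hdz : dz = (d : Int))
    (h : k + d < T.length) :
    PySem.List.pyGetD (List.map (fun x : Nat =>
      decide (nwd (PySem.List.pyGetD T (x : Int) 0) (PySem.List.pyGetD T ((x : Int) + dz) 0) = 1))
      (List.range (T.length - d))) (k : Int) false = pvQ T d k := by
  subst hdz
  rw [PySem.List.pyGetD_natCast, PySem.List.getD_map_range _ _ _ _ (by omega)]
  have e : ((k : Int) + (d : Int)) = ((k + d : Nat) : Int) := by push_cast; ring
  rw [e, PySem.List.pyGetD_natCast, PySem.List.pyGetD_natCast]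
  rfl

theorem pvB_eq (T : List Int) : trojki_alt T = pvCnt T := by
  simp only [trojki_alt, PySem.List.len]
  simp only [show ((T.length : Int) - 1) = ((T.length : Int) - ((1 : Nat) : Int)) from by norm_num,
      show ((T.length : Int) - 2) = ((T.length : Int) - ((2 : Nat) : Int)) from by norm_num,
      show ((T.length : Int) - 3) = ((T.length : Int) - ((3 : Nat) : Int)) from by norm_num,
      show ((T.length : Int) - 4) = ((T.length : Int) - ((4 : Nat) : Int)) from by norm_num]
  simp only [PySem.List.foldl_if_add_one, pvPyRange_sub, List.map_map, List.countP_map,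
    Function.comp_def]
  have e11 : List.countP (fun k : Nat => PySem.List.pyGetD (List.map (fun x : Nat => decide (nwd (PySem.List.pyGetD T (x : Int) 0) (PySem.List.pyGetD T ((x : Int) + 1) 0) = 1)) (List.range (T.length - 1))) ((k : Int)) false &&
      PySem.List.pyGetD (List.map (fun x : Nat => decide (nwd (PySem.List.pyGetD T (x : Int) 0) (PySem.List.pyGetD T ((x : Int) + 1) 0) = 1)) (List.range (T.length - 1))) ((k : Int) + 1) false &&
      PySem.List.pyGetD (List.map (fun x : Nat => decide (nwd (PySem.List.pyGetD T (x : Int) 0) (PySem.List.pyGetD T ((x : Int) + 2) 0) = 1)) (List.range (T.length - 2))) ((k : Int)) false)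
      (List.range (T.length - 2)) = List.countP (pvQ11 T) (List.range (T.length - 2)) := by
    apply List.countP_congr
    intro a ha
    have h := List.mem_range.mp ha
    have eA : ((a : Int) + 1) = ((a + 1 : Nat) : Int) := by push_cast; ring
    rw [eA, pvCopLookup T 1 1 a (by norm_num) (by omega),
        pvCopLookup T 1 1 (a + 1) (by norm_num) (by omega),
        pvCopLookup T 2 2 a (by norm_num) (by omega)]
    simp [pvQ11]
  have e12 : List.countP (fun k : Nat => PySem.List.pyGetD (List.map (fun x : Nat => decide (nwd (PySem.List.pyGetD T (x : Int) 0) (PySem.List.pyGetD T ((x : Int) + 1) 0) = 1)) (List.range (T.length - 1))) ((k : Int)) false &&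
      PySem.List.pyGetD (List.map (fun x : Nat => decide (nwd (PySem.List.pyGetD T (x : Int) 0) (PySem.List.pyGetD T ((x : Int) + 2) 0) = 1)) (List.range (T.length - 2))) ((k : Int) + 1) false &&
      PySem.List.pyGetD (List.map (fun x : Nat => decide (nwd (PySem.List.pyGetD T (x : Int) 0) (PySem.List.pyGetD T ((x : Int) + 3) 0) = 1)) (List.range (T.length - 3))) ((k : Int)) false)
      (List.range (T.length - 3)) = List.countP (pvQ12 T) (List.range (T.length - 3)) := by
    apply List.countP_congr
    intro a ha
    have h := List.mem_range.mp ha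
    have eA : ((a : Int) + 1) = ((a + 1 : Nat) : Int) := by push_cast; ring
    rw [eA, pvCopLookup T 1 1 a (by norm_num) (by omega),
        pvCopLookup T 2 2 (a + 1) (by norm_num) (by omega),
        pvCopLookup T 3 3 a (by norm_num) (by omega)]
    simp [pvQ12]
  have e21 : List.countP (fun k : Nat => PySem.List.pyGetD (List.map (fun x : Nat => decide (nwd (PySem.List.pyGetD T (x : Int) 0) (PySem.List.pyGetD T ((x : Int) + 2) 0) = 1)) (List.range (T.length - 2))) ((k : Int)) false &&
      PySem.List.pyGetD (List.map (fun x : Nat => decide (nwd (PySem.List.pyGetD T (x : Int) 0) (PySem.List.pyGetD T ((x : Int) + 1) 0) = 1)) (List.range (T.length - 1))) ((k : Int) + 2) false &&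
      PySem.List.pyGetD (List.map (fun x : Nat => decide (nwd (PySem.List.pyGetD T (x : Int) 0) (PySem.List.pyGetD T ((x : Int) + 3) 0) = 1)) (List.range (T.length - 3))) ((k : Int)) false)
      (List.range (T.length - 3)) = List.countP (pvQ21 T) (List.range (T.length - 3)) := by
    apply List.countP_congr
    intro a ha
    have h := List.mem_range.mp ha
    have eB : ((a : Int) + 2) = ((a + 2 : Nat) : Int) := by push_cast; ring
    rw [eB, pvCopLookup T 2 2 a (by norm_num) (by omega),
        pvCopLookup T 1 1 (a + 2) (by norm_num) (by omega),
        pvCopLookup T 3 3 a (by norm_num) (by omega)]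
    simp [pvQ21]
  have e22 : List.countP (fun k : Nat => PySem.List.pyGetD (List.map (fun x : Nat => decide (nwd (PySem.List.pyGetD T (x : Int) 0) (PySem.List.pyGetD T ((x : Int) + 2) 0) = 1)) (List.range (T.length - 2))) ((k : Int)) false &&
      PySem.List.pyGetD (List.map (fun x : Nat => decide (nwd (PySem.List.pyGetD T (x : Int) 0) (PySem.List.pyGetD T ((x : Int) + 2) 0) = 1)) (List.range (T.length - 2))) ((k : Int) + 2) false &&
      PySem.List.pyGetD (List.map (fun x : Nat => decide (nwd (PySem.List.pyGetD T (x : Int) 0) (PySem.List.pyGetD T ((x : Int) + 4) 0) = 1)) (List.range (T.length - 4))) ((k : Int)) false)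
      (List.range (T.length - 4)) = List.countP (pvQ22 T) (List.range (T.length - 4)) := by
    apply List.countP_congr
    intro a ha
    have h := List.mem_range.mp ha
    have eB : ((a : Int) + 2) = ((a + 2 : Nat) : Int) := by push_cast; ring
    rw [eB, pvCopLookup T 2 2 a (by norm_num) (by omega),
        pvCopLookup T 2 2 (a + 2) (by norm_num) (by omega),
        pvCopLookup T 4 4 a (by norm_num) (by omega)]
    simp [pvQ22]
  rw [e11, e12, e21, e22]
  unfold pvCnt
  ring

-- ===== VERDICT (by name: the statement is the Claim_ definition above) =====
theorem trojki_spec : Claim_equal_trojki := by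
  intro T _
  unfold Spec_trojki
  rw [pvA_eq, pvB_eq]
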